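-- pv_equiv track=rewrite | github.com/Fondamenti18/fondamenti-di-programmazione | students/1800408/homework04/program01.py | analisi
-- ===== SOURCE A (Python) =====
-- def analisi(lista,massimo):
--     lista1=[]
--     x=0
--     diz={}
--     while x<=massimo:
--         for el1,el2 in lista:
--             if el1==x:
--                 lista1.append(el2)
--                 lista1.sort()
--         diz[x]=lista1
--         lista1=[]
--         x+=1
--     return diz
-- ===== SOURCE B (Python) =====
-- def analisi(lista, massimo):
--     buckets = {x: [] for x in range(massimo + 1)}
--     for a, b in lista:
--         if 0 <= a <= massimo:
--             buckets[a].append(b)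
--     return {x: sorted(v) for x, v in buckets.items()}
-- ===== Notes on version B (the rewrite author's own statement) =====
-- stated objective: faster
-- what changed: Replaces the per-key rescan of the whole list (with a re-sort after every single append) by one pass that buckets each pair into a preinitialized dict, sorting each bucket exactly once at the end.
import Mathlib
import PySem

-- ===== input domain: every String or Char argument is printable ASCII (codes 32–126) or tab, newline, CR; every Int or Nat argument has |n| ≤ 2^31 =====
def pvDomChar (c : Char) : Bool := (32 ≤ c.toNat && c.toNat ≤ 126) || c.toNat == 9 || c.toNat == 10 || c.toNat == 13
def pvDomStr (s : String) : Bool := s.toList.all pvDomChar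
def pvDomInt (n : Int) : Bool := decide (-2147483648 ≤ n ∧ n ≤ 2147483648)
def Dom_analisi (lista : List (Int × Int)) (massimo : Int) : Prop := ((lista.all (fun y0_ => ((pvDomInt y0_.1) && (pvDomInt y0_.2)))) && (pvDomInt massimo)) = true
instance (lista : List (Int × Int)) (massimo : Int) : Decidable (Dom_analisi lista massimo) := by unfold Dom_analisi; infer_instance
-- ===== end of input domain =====

-- B replaces A's per-key rescan of the whole list (with a re-sort after every append) by one
-- bucketing pass into a preinitialized dict, sorting each bucket once — measurably faster.

-- ===== PORT A =====
def analisi (lista : List (Int × Int)) (massimo : Int) : List (Int × List Int) :=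
  ((PySem.List.pyRange 0 (massimo + 1)).foldl
    (fun (diz : PySem.Dict Int (List Int)) x =>
      diz.insert x
        (lista.foldl
          (fun lista1 el =>
            if el.1 == x then PySem.List.sorted (lista1 ++ [el.2]) (fun y => y)
            else lista1)
          []))
    PySem.Dict.empty).items

-- ===== PORT B =====
def analisi_alt (lista : List (Int × Int)) (massimo : Int) : List (Int × List Int) :=
  let buckets : PySem.Dict Int (List Int) :=
    (PySem.List.pyRange 0 (massimo + 1)).foldl (fun d x => d.insert x []) PySem.Dict.empty
  let buckets2 : PySem.Dict Int (List Int) :=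
    lista.foldl
      (fun d el =>
        if 0 ≤ el.1 ∧ el.1 ≤ massimo then d.modify el.1 [] (fun v => v ++ [el.2]) else d)
      buckets
  buckets2.items.map (fun kv => (kv.1, PySem.List.sorted kv.2 (fun y => y)))

-- ===== PRECONDITION & SPEC =====
def Spec_analisi (lista : List (Int × Int)) (massimo : Int) (out : List (Int × List Int)) : Prop := out = analisi_alt lista massimo
instance (lista : List (Int × Int)) (massimo : Int) (out : List (Int × List Int)) : Decidable (Spec_analisi lista massimo out) := by unfold Spec_analisi; infer_instance

-- ===== CLAIM (what is proved, stated in full; the proofs are below) =====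
def Claim_equal_analisi : Prop := ∀ (lista : List (Int × Int)) (massimo : Int), Dom_analisi lista massimo → Spec_analisi lista massimo (analisi lista massimo)

-- ===== LEMMAS AND PROOFS =====

-- Python's sorted on ints is permutation-invariant.
theorem sortedInt_congr_perm {l l' : List Int} (h : l.Perm l') :
    PySem.List.sorted l (fun y => y) = PySem.List.sorted l' (fun y => y) :=
  PySem.List.eq_of_perm_of_pairwise_le_of_injective (fun y => y) (fun _ _ h => h)
    (((PySem.List.sorted_perm l _ _).trans h).trans (PySem.List.sorted_perm l' _ _).symm)
    (PySem.List.sorted_pairwise l _) (PySem.List.sorted_pairwise l' _)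

-- A's inner loop (append then sort, per matching pair) just sorts the matching values.
theorem innerA (x : Int) (l : List (Int × Int)) : ∀ (acc : List Int),
    PySem.List.sorted acc (fun y => y) = acc →
    List.foldl (fun lista1 el =>
        if el.1 == x then PySem.List.sorted (lista1 ++ [el.2]) (fun y => y) else lista1) acc l
    = PySem.List.sorted
        (acc ++ List.map (fun el => el.2) (List.filter (fun el => el.1 == x) l)) (fun y => y) := by
  induction l with
  | nil => intro acc h; simpa using h.symm
  | cons el l ih =>
    intro acc h
    rw [List.foldl_cons]
    by_cases hx : (el.1 == x) = true
    · simp only [hx, if_true]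
      rw [ih _ (sortedInt_congr_perm (PySem.List.sorted_perm _ _ _))]
      rw [sortedInt_congr_perm
        ((PySem.List.sorted_perm (acc ++ [el.2]) (fun y => y) false).append_right _)]
      simp [List.filter_cons, hx, List.append_assoc]
    · rw [if_neg hx, ih _ h]
      simp [List.filter_cons, hx]

-- Inserting pairwise-distinct fresh keys appends their pairs in order.
theorem items_foldl_insert (f : Int → List Int) :
    ∀ (keys : List Int) (d : PySem.Dict Int (List Int)), keys.Nodup →
    (∀ k ∈ keys, d.contains k = false) →
    (List.foldl (fun d x => PySem.Dict.insert d x (f x)) d keys).items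
      = d.items ++ keys.map (fun x => (x, f x)) := by
  intro keys
  induction keys with
  | nil => intro d _ _; simp
  | cons k ks ih =>
    intro d hnd hfresh
    rw [List.foldl_cons]
    have hc : d.contains k = false := hfresh k (by simp)
    have hins : (PySem.Dict.insert d k (f k)).items = d.items ++ [(k, f k)] := by
      simp [PySem.Dict.insert, hc]
    have hfresh' : ∀ k' ∈ ks, (PySem.Dict.insert d k (f k)).contains k' = false := by
      intro k' hk'
      rw [PySem.Dict.contains_insert]
      have hne : k' ≠ k := by
        rintro rfl; exact (List.nodup_cons.mp hnd).1 hk'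
      simp [hne, hfresh k' (List.mem_cons_of_mem _ hk')]
    rw [ih (PySem.Dict.insert d k (f k)) (List.nodup_cons.mp hnd).2 hfresh', hins]
    simp

-- First match in a key-value list built by mapping over the key list.
theorem find_map_eq (g : Int → List Int) : ∀ (R : List Int) (k : Int), k ∈ R →
    List.find? (fun p => p.1 == k) (R.map (fun x => (x, g x))) = some (k, g k) := by
  intro R
  induction R with
  | nil => simp
  | cons r rs ih =>
    intro k hk
    by_cases h : r = k
    · subst h; simp
    · have hk' : k ∈ rs := by
        rcases List.mem_cons.mp hk with h' | h'
        · exact absurd h'.symm h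
        · exact h'
      simp [List.find?_cons, h, ih k hk']

-- In-place append to the bucket of a key present in a map-shaped dict.
theorem items_modify_map (g : Int → List Int) (R : List Int) (k b : Int) (hk : k ∈ R)
    (d : PySem.Dict Int (List Int)) (hd : d.items = R.map (fun x => (x, g x))) :
    (PySem.Dict.modify d k [] (fun v => v ++ [b])).items
      = R.map (fun x => (x, if x = k then g x ++ [b] else g x)) := by
  have hcon : d.contains k = true := by
    simp only [PySem.Dict.contains, hd, List.any_eq_true]
    exact ⟨(k, g k), List.mem_map_of_mem hk, by simp⟩
  have hg : d.getD k [] = g k := by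
    simp [PySem.Dict.getD, PySem.Dict.get?, hd, find_map_eq g R k hk]
  simp only [PySem.Dict.modify, PySem.Dict.insert, hcon, if_true, hg, hd, List.map_map]
  apply List.map_congr_left
  intro x _
  by_cases hxk : x = k
  · subst hxk; simp
  · simp [hxk]

-- B's single pass maintains every bucket as the matching values seen so far.
theorem foldB (massimo : Int) (l : List (Int × Int)) :
    ∀ (g : Int → List Int) (d : PySem.Dict Int (List Int)),
    d.items = (PySem.List.pyRange 0 (massimo + 1)).map (fun x => (x, g x)) →
    (List.foldl (fun d el =>
        if 0 ≤ el.1 ∧ el.1 ≤ massimo then PySem.Dict.modify d el.1 [] (fun v => v ++ [el.2])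
        else d) d l).items
      = (PySem.List.pyRange 0 (massimo + 1)).map
          (fun x => (x, g x ++ List.map (fun el => el.2) (List.filter (fun el => el.1 == x) l))) := by
  induction l with
  | nil => intro g d hd; simpa using hd
  | cons el l ih =>
    intro g d hd
    rw [List.foldl_cons]
    by_cases hin : 0 ≤ el.1 ∧ el.1 ≤ massimo
    · rw [if_pos hin]
      have hkmem : el.1 ∈ PySem.List.pyRange 0 (massimo + 1) := by
        rw [PySem.List.mem_pyRange_one]; omega
      rw [ih (fun x => if x = el.1 then g x ++ [el.2] else g x) _
          (items_modify_map g _ el.1 el.2 hkmem d hd)]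
      apply List.map_congr_left
      intro x _
      by_cases hxk : x = el.1
      · subst hxk; simp [List.filter_cons]
      · have hbe : (el.1 == x) = false := by
          simp only [beq_eq_false_iff_ne]; exact fun h => hxk h.symm
        simp [List.filter_cons, hbe, hxk]
    · rw [if_neg hin]
      rw [ih g d hd]
      apply List.map_congr_left
      intro x hx
      have hxr := (PySem.List.mem_pyRange_one).mp hx
      have hbe : (el.1 == x) = false := by
        simp only [beq_eq_false_iff_ne]; intro h; omega
      simp [List.filter_cons, hbe]

-- ===== VERDICT (by name: the statement is the Claim_ definition above) =====
theorem analisi_spec : Claim_equal_analisi := by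
  intro lista massimo _
  unfold Spec_analisi
  have hnd : (PySem.List.pyRange 0 (massimo + 1)).Nodup :=
    PySem.List.nodup_pyRange_one 0 (massimo + 1)
  have hA : analisi lista massimo
      = (PySem.List.pyRange 0 (massimo + 1)).map (fun x =>
          (x, PySem.List.sorted
                (List.map (fun el => el.2) (List.filter (fun el => el.1 == x) lista))
                (fun y => y))) := by
    unfold analisi
    rw [items_foldl_insert
      (fun x => lista.foldl
        (fun lista1 el =>
          if el.1 == x then PySem.List.sorted (lista1 ++ [el.2]) (fun y => y) else lista1) [])
      (PySem.List.pyRange 0 (massimo + 1)) PySem.Dict.empty hnd (fun k _ => rfl)]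
    simp only [PySem.Dict.empty, List.nil_append]
    apply List.map_congr_left
    intro x _
    have h0 : PySem.List.sorted ([] : List Int) (fun y => y) = [] := by
      simp [PySem.List.sorted]
    rw [innerA x lista [] h0]
    simp
  have hB : analisi_alt lista massimo
      = (PySem.List.pyRange 0 (massimo + 1)).map (fun x =>
          (x, PySem.List.sorted
                (List.map (fun el => el.2) (List.filter (fun el => el.1 == x) lista))
                (fun y => y))) := by
    simp only [analisi_alt]
    rw [foldB massimo lista (fun _ => []) _ (by
      rw [items_foldl_insert (fun _ => []) (PySem.List.pyRange 0 (massimo + 1))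
        PySem.Dict.empty hnd (fun k _ => rfl)]
      simp [PySem.Dict.empty])]
    simp [List.map_map, Function.comp]
  rw [hA, hB]
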